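-- pv_equiv track=rewrite | github.com/kkr010128/codebert | problem114/problem114_111.py | calc_score_list
-- ===== SOURCE A (Python) =====
-- NUM_CONTESTS = 26
--
-- def calc_score_list(s_list, c_list, t_list):
--     last = [-1 for _ in range(NUM_CONTESTS)]
--     score_list = []
--     score = 0
--     for d, t in enumerate(t_list):
--         last[t - 1] = d
--         score += s_list[d][t - 1] - sum([c * (d - l) for c, l in zip(c_list, last)])
--         score_list.append(score)
--     return score_list
-- ===== SOURCE B (Python) =====
-- NUM_CONTESTS = 26
--
-- def calc_score_list(s_list, c_list, t_list):
--     # One decrement per contest; contests beyond the given costs decay nothing.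
--     decay = (c_list + [0] * NUM_CONTESTS)[:NUM_CONTESTS]
--     total = sum(decay)
--     last = [-1] * NUM_CONTESTS
--     weighted = -total  # invariant: sum of decay[i] * (day contest i was last held)
--     score = 0
--     result = []
--     for day, t in enumerate(t_list):
--         weighted += decay[t - 1] * (day - last[t - 1])
--         last[t - 1] = day
--         score += s_list[day][t - 1] - (total * day - weighted)
--         result.append(score)
--     return result
-- ===== Notes on version B (the rewrite author's own statement) =====
-- stated objective: faster
-- what changed: Normalises the costs once to a fixed 26-entry per-contest decay table and replaces A's per-day 26-wide zip/sum penalty scan by two running totals (total decay and the weighted sum of last-held days), so each day's penalty is the O(1) expression total*day - weighted.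
import Mathlib
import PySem

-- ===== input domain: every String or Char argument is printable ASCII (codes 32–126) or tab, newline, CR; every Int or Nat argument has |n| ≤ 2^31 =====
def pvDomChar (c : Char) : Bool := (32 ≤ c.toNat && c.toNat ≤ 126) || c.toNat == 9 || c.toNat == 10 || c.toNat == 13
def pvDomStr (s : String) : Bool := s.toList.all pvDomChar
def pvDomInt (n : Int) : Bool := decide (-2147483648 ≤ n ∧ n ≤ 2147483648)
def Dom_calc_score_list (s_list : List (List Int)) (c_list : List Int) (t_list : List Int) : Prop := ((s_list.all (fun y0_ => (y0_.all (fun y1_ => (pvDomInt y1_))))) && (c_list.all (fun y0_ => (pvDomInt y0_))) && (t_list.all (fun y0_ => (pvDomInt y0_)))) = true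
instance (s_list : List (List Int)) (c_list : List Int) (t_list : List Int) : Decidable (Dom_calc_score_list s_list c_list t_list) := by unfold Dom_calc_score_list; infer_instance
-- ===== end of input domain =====

-- B normalises the costs once to one decrement per contest and maintains running totals (total
-- decay and the weighted sum of last-held days), replacing A's per-day 26-wide zip/sum penalty
-- scan by a constant-size update; objective: faster (fewer operations per day; not timed here).

-- ===== PORT A =====
-- loop body of A: last[t-1] = d; score += s_list[d][t-1] - sum(c*(d-l) for c,l in zip(c_list,last)); append
def stepA (s_list : List (List Int)) (c_list : List Int)
    (st : List Int × Int × List Int) (dt : Int × Int) : List Int × Int × List Int :=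
  let last := PySem.List.pySetD st.1 (dt.2 - 1) dt.1
  let pen := ((c_list.zip last).map (fun p => p.1 * (dt.1 - p.2))).sum
  let score := st.2.1 + (PySem.List.pyGetD (PySem.List.pyGetD s_list dt.1 []) (dt.2 - 1) 0 - pen)
  (last, score, st.2.2 ++ [score])

def calc_score_list (s_list : List (List Int)) (c_list : List Int) (t_list : List Int) : List Int :=
  let last : List Int := (PySem.List.pyRange 0 26 1).map (fun _ => (-1 : Int))
  ((PySem.List.enumerate t_list 0).foldl (stepA s_list c_list) (last, 0, ([] : List Int))).2.2

-- ===== PORT B =====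
-- B's for-loop as structural recursion over t_list, carrying (day, weighted, last, score);
-- each score appended to `result` is emitted as the head of the remaining output
def loopB (s_list : List (List Int)) (decay : List Int) (total : Int) :
    Int → Int → List Int → Int → List Int → List Int
  | _, _, _, _, [] => []
  | day, weighted, last, score, t :: ts =>
    let w := weighted + PySem.List.pyGetD decay (t - 1) 0 * (day - PySem.List.pyGetD last (t - 1) 0)
    let nlast := PySem.List.pySetD last (t - 1) day
    let ns := score + (PySem.List.pyGetD (PySem.List.pyGetD s_list day []) (t - 1) 0 - (total * day - w))
    ns :: loopB s_list decay total (day + 1) w nlast ns ts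

def calc_score_list_alt (s_list : List (List Int)) (c_list : List Int) (t_list : List Int) : List Int :=
  -- (c_list + [0]*26)[:26] — a [:n] slice of a list of length ≥ n is exactly take n
  let decay := (c_list ++ List.replicate 26 (0 : Int)).take 26
  let total := decay.sum
  loopB s_list decay total 0 (-total) (List.replicate 26 (-1 : Int)) 0 t_list


-- ===== PRECONDITION & SPEC =====
-- Pre_ is exactly where Python A returns normally: every day has a score row, and each t is a
-- legal (possibly negative) Python index into the 26-entry `last` and into that day's row;
-- outside it A raises IndexError.
def Pre_calc_score_list (s_list : List (List Int)) (c_list : List Int) (t_list : List Int) : Prop :=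
  t_list.length ≤ s_list.length ∧ (∀ x ∈ t_list, -25 ≤ x ∧ x ≤ 26) ∧
  (∀ p ∈ t_list.zip s_list, -(p.2.length : Int) ≤ p.1 - 1 ∧ p.1 - 1 < (p.2.length : Int))
instance (s_list : List (List Int)) (c_list : List Int) (t_list : List Int) : Decidable (Pre_calc_score_list s_list c_list t_list) := by unfold Pre_calc_score_list; infer_instance

def pvWitness_calc_score_list : List (List Int) × List Int × List Int :=
  ([[5, 7], [1, 2, 3]], [2, 3], [2, 1])

def Spec_calc_score_list (s_list : List (List Int)) (c_list : List Int) (t_list : List Int) (out : List Int) : Prop := out = calc_score_list_alt s_list c_list t_list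
instance (s_list : List (List Int)) (c_list : List Int) (t_list : List Int) (out : List Int) : Decidable (Spec_calc_score_list s_list c_list t_list out) := by unfold Spec_calc_score_list; infer_instance

-- ===== CLAIM =====
def Claim_equal_calc_score_list : Prop := ∀ (s_list : List (List Int)) (c_list : List Int) (t_list : List Int), Dom_calc_score_list s_list c_list t_list → Pre_calc_score_list s_list c_list t_list → Spec_calc_score_list s_list c_list t_list (calc_score_list s_list c_list t_list)

-- ===== LEMMAS AND PROOFS =====

def pvDot (c l : List Int) : Int := ((c.zip l).map (fun p => p.1 * p.2)).sum

lemma pen_formula (d : Int) : ∀ (c l : List Int),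
    ((c.zip l).map (fun p => p.1 * (d - p.2))).sum = (c.take l.length).sum * d - pvDot c l := by
  intro c
  induction c with
  | nil => intro l; simp [pvDot]
  | cons a c ih =>
    intro l
    cases l with
    | nil => simp [pvDot]
    | cons b l => simp [pvDot, ih l]; simp [pvDot] at ih ⊢; ring

lemma dot_replicate : ∀ (c : List Int) (n : Nat), pvDot c (List.replicate n (-1)) = -((c.take n).sum) := by
  intro c
  induction c with
  | nil => intro n; simp [pvDot]
  | cons a c ih =>
    intro n
    cases n with
    | zero => simp [pvDot]
    | succ n =>
      simp [List.replicate_succ, pvDot] at ih ⊢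
      rw [ih n]; ring

lemma dot_set (v : Int) : ∀ (c l : List Int) (j : Nat), j < l.length →
    pvDot c (l.set j v) = pvDot c l + (if j < c.length then c.getD j 0 * (v - l.getD j 0) else 0) := by
  intro c
  induction c with
  | nil => intro l j _; simp [pvDot]
  | cons a c ih =>
    intro l j hj
    cases l with
    | nil => simp at hj
    | cons b l =>
      cases j with
      | zero => simp [pvDot]; ring
      | succ j =>
        simp at hj
        simp [pvDot, List.set_cons_succ] at ih ⊢
        rw [ih l j hj]
        ring

-- dotting against c and against its zero-padded 26-entry normalisation agree on a 26-entry list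
lemma dot_zero : ∀ (l : List Int) (k : Nat), pvDot (List.replicate k 0) l = 0 := by
  intro l
  induction l with
  | nil => intro k; simp [pvDot]
  | cons b l ih =>
    intro k
    cases k with
    | zero => simp [pvDot]
    | succ k =>
      have := ih k
      simp only [pvDot, List.replicate_succ, List.zip_cons_cons, List.map_cons,
        List.sum_cons] at this ⊢
      simp [this]

lemma dot_take_pad : ∀ (l c : List Int) (m : Nat), l.length ≤ m →
    pvDot ((c ++ List.replicate m 0).take l.length) l = pvDot c l := by
  intro l
  induction l with
  | nil => intro c m _; simp [pvDot]
  | cons b l ih =>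
    intro c m hm
    cases c with
    | nil =>
      rw [List.nil_append, List.take_replicate, dot_zero]
      simp [pvDot]
    | cons a c =>
      have hm' : l.length ≤ m := by simp at hm; omega
      simp only [List.cons_append, List.length_cons, List.take_succ_cons, pvDot,
        List.zip_cons_cons, List.map_cons, List.sum_cons]
      have := ih c m hm'
      simp only [pvDot] at this
      rw [this]

lemma sum_take_pad (c : List Int) :
    ((c ++ List.replicate 26 (0 : Int)).take 26).sum = (c.take 26).sum := by
  rw [List.take_append, List.take_replicate]
  simp

lemma pad_length (c : List Int) : ((c ++ List.replicate 26 (0 : Int)).take 26).length = 26 := by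
  simp

-- Python's `xs[e] = v` / `xs[e]` on a 26-entry list, negative e counting from the end:
-- exactly index e % 26.
lemma pySetD_wrap (xs : List Int) (e v : Int) (hlen : xs.length = 26)
    (h1 : -26 ≤ e) (h2 : e < 26) :
    PySem.List.pySetD xs e v = xs.set (PySem.Int.mod e 26).toNat v := by
  have hm : PySem.Int.mod e 26 = e % 26 := PySem.Int.mod_eq_emod_of_pos (by omega)
  rw [hm]
  unfold PySem.List.pySetD PySem.List.pySet?
  simp [PySem.List.pyIdx?, hlen]
  split_ifs <;> simp <;> congr 1 <;> omega

lemma pyGetD_wrap (xs : List Int) (e : Int) (hlen : xs.length = 26)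
    (h1 : -26 ≤ e) (h2 : e < 26) :
    PySem.List.pyGetD xs e 0 = xs.getD (PySem.Int.mod e 26).toNat 0 := by
  have hm : PySem.Int.mod e 26 = e % 26 := PySem.Int.mod_eq_emod_of_pos (by omega)
  rw [hm]
  unfold PySem.List.pyGetD PySem.List.pyGet?
  simp [PySem.List.pyIdx?, hlen, List.getD]
  split_ifs
  · have he : e.toNat = (e % 26).toNat := by omega
    simp [he]
  · have he : 26 - (-e).toNat = (e % 26).toNat := by omega
    simp [he]

lemma loop_eq (s_list : List (List Int)) (c_list : List Int) :
    ∀ (ts : List Int) (d : Int) (lastA : List Int) (Q score : Int) (acc : List Int),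
      Q = pvDot c_list lastA → lastA.length = 26 →
      (∀ x ∈ ts, -25 ≤ x ∧ x ≤ 26) →
      ((PySem.List.enumerate ts d).foldl (stepA s_list c_list) (lastA, score, acc)).2.2
        = acc ++ loopB s_list ((c_list ++ List.replicate 26 0).take 26)
            ((c_list ++ List.replicate 26 0).take 26).sum d Q lastA score ts := by
  intro ts
  induction ts with
  | nil => intro d lastA Q score acc _ _ _; simp [PySem.List.enumerate_nil, loopB]
  | cons t ts ih =>
    intro d lastA Q score acc hQ hlen hmem
    obtain ⟨ht1, ht2⟩ := hmem t (List.mem_cons_self ..)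
    rw [PySem.List.enumerate_cons]
    simp only [List.foldl_cons]
    set decay := (c_list ++ List.replicate 26 (0 : Int)).take 26 with hdecay
    set i : Nat := (PySem.Int.mod (t - 1) 26).toNat with hidef
    have hm : PySem.Int.mod (t - 1) 26 = (t - 1) % 26 := PySem.Int.mod_eq_emod_of_pos (by omega)
    have hi26 : i < 26 := by rw [hm] at hidef; omega
    have hdlen : decay.length = 26 := pad_length c_list
    have hsetA : PySem.List.pySetD lastA (t - 1) d = lastA.set i d :=
      pySetD_wrap lastA (t - 1) d hlen (by omega) (by omega)
    have hgetd : PySem.List.pyGetD decay (t - 1) 0 = decay.getD i 0 :=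
      pyGetD_wrap decay (t - 1) hdlen (by omega) (by omega)
    have hgetl : PySem.List.pyGetD lastA (t - 1) 0 = lastA.getD i 0 :=
      pyGetD_wrap lastA (t - 1) hlen (by omega) (by omega)
    have hQ' : Q + PySem.List.pyGetD decay (t - 1) 0 * (d - PySem.List.pyGetD lastA (t - 1) 0)
        = pvDot c_list (lastA.set i d) := by
      have hds : pvDot decay (lastA.set i d)
          = pvDot decay lastA + decay.getD i 0 * (d - lastA.getD i 0) := by
        rw [dot_set d decay lastA i (by omega), if_pos (by omega)]
      have e1 : pvDot decay lastA = pvDot c_list lastA := by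
        have h := dot_take_pad lastA c_list 26 (by omega)
        rw [hlen] at h
        rw [hdecay]; exact h
      have e2 : pvDot decay (lastA.set i d) = pvDot c_list (lastA.set i d) := by
        have h := dot_take_pad (lastA.set i d) c_list 26 (by simp [hlen])
        rw [List.length_set, hlen] at h
        rw [hdecay]; exact h
      rw [hgetd, hgetl, hQ, ← e1, ← e2, hds]
    have hpen : ((c_list.zip (lastA.set i d)).map (fun p => p.1 * (d - p.2))).sum
        = decay.sum * d - pvDot c_list (lastA.set i d) := by
      rw [pen_formula, List.length_set, hlen, hdecay, sum_take_pad]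
    simp only [stepA, loopB, hsetA, hQ', hpen]
    rw [ih (d + 1) (lastA.set i d) (pvDot c_list (lastA.set i d)) _ _
      rfl (by simp [hlen]) (fun x hx => hmem x (List.mem_cons_of_mem _ hx))]
    simp

lemma init_last : (PySem.List.pyRange 0 26 1).map (fun _ => (-1 : Int)) = List.replicate 26 (-1 : Int) := by
  decide

-- ===== VERDICT =====
theorem calc_score_list_spec : Claim_equal_calc_score_list := by
  intro s_list c_list t_list _ hpre
  unfold Spec_calc_score_list calc_score_list calc_score_list_alt
  simp only [init_last]
  have h := loop_eq s_list c_list t_list 0 (List.replicate 26 (-1))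
    (pvDot c_list (List.replicate 26 (-1))) 0 [] rfl (by simp) hpre.2.1
  rw [h, dot_replicate c_list 26]
  have : -((c_list.take 26).sum) = -(((c_list ++ List.replicate 26 (0 : Int)).take 26).sum) := by
    rw [sum_take_pad]
  rw [this]
  simp
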